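-- pv_equiv track=rewrite | github.com/Eliasamani/IV1351-Soundgood | seminar_3/generate_script.py | create_student_relations
-- ===== SOURCE A (Python) =====
-- def create_student_relations(families):
--     student_relations = []
--     student_id = 1
--     contact_person_id = 1
--
--     for family in families:
--         # Each family has a contact person, so assign the first student of each family to the contact person
--         for _ in family:
--             student_relations.append((student_id, contact_person_id))
--             student_id += 1  # Move to the next student
--         contact_person_id += 1  # Move to the next contact person after assigning the whole family
--
--     return student_relations
-- ===== SOURCE B (Python) =====
-- def create_student_relations(families):
--     # Phase 1: prefix totals -- prefix[i] = number of students in families[0..i]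
--     prefix = []
--     total = 0
--     for family in families:
--         total += len(family)
--         prefix.append(total)
--     # Phase 2: student s (1..total) belongs to the family whose prefix block
--     # contains s; its contact id is 1 + rank of s in the sorted prefix table,
--     # found by binary search (rank = number of prefix totals strictly below s).
--     out = []
--     for s in range(1, total + 1):
--         lo, hi = 0, len(prefix)
--         while lo < hi:
--             mid = (lo + hi) // 2
--             if prefix[mid] < s:
--                 lo = mid + 1
--             else:
--                 hi = mid
--         out.append((s, 1 + lo))
--     return out
-- ===== Notes on version B (the rewrite author's own statement) =====
-- stated objective: alternative
-- what changed: Replaces the fused nested loop with mutable counters by a two-phase rank-query algorithm: first build the prefix-sum table of family sizes, then derive each student's contact id as 1 + the rank of the student id in that sorted table, found by binary search.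
import Mathlib
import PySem

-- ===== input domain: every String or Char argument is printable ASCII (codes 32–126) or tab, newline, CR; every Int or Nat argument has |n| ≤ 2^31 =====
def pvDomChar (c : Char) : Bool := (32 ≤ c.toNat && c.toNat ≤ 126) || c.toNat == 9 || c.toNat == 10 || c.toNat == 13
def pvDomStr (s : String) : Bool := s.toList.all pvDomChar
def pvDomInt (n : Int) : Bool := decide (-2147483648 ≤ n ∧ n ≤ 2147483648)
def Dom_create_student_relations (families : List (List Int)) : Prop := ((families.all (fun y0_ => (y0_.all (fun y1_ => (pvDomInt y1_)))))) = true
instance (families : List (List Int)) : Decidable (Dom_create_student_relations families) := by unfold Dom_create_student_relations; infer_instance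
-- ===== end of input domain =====

-- B replaces the fused nested loop by a two-phase rank-query algorithm (prefix-sum table, then
-- 1 + rank of each student id in that table); same output, no speed claim (objective: alternative).

-- ===== PORT A =====
-- literal port: nested loops over state (student_relations, student_id, contact_person_id)
def create_student_relations (families : List (List Int)) : List (Int × Int) :=
  (families.foldl
    (fun (st : List (Int × Int) × Int × Int) family =>
      let inner := family.foldl
        (fun (s : List (Int × Int) × Int) _ => (s.1 ++ [(s.2, st.2.2)], s.2 + 1))
        (st.1, st.2.1)
      (inner.1, inner.2, st.2.2 + 1))
    ([], 1, 1)).1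

-- ===== PORT B =====
-- B: binary search of the while-loop in Source B: rank of s in the prefix table
-- (lo, hi move exactly as in the Python loop; prefix[mid] ported via pyGetD, mid always in range)
def pvBisect (pfx : List Int) (s : Int) (lo hi : Nat) : Nat :=
  if _h : lo < hi then
    let mid := (lo + hi) / 2
    if PySem.List.pyGetD pfx (mid : Int) 0 < s then pvBisect pfx s (mid + 1) hi
    else pvBisect pfx s lo mid
  else lo
termination_by hi - lo
decreasing_by all_goals omega

-- B: build the prefix-total table, then map each student id s in range(1, total+1) to
-- (s, 1 + rank of s in the table) using the binary search above
def create_student_relations_alt (families : List (List Int)) : List (Int × Int) :=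
  let st := families.foldl
    (fun (st : List Int × Int) family =>
      let t := st.2 + (family.length : Int)
      (st.1 ++ [t], t))
    ([], 0)
  (PySem.List.pyRange 1 (st.2 + 1) 1).map
    (fun s => (s, 1 + (pvBisect st.1 s 0 st.1.length : Int)))

-- ===== PRECONDITION & SPEC =====
def Spec_create_student_relations (families : List (List Int)) (out : List (Int × Int)) : Prop := out = create_student_relations_alt families
instance (families : List (List Int)) (out : List (Int × Int)) : Decidable (Spec_create_student_relations families out) := by unfold Spec_create_student_relations; infer_instance

-- ===== CLAIM (what is proved, stated in full; the proofs are below) =====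
def Claim_equal_create_student_relations : Prop := ∀ (families : List (List Int)), Dom_create_student_relations families → Spec_create_student_relations families (create_student_relations families)

-- ===== LEMMAS AND PROOFS =====

-- prefix-total table of family sizes starting from base t
def pvPfx : List (List Int) → Int → List Int
  | [], _ => []
  | f :: fs, t => (t + (f.length : Int)) :: pvPfx fs (t + (f.length : Int))

-- total number of members
def pvTot : List (List Int) → Int
  | [] => 0
  | f :: fs => (f.length : Int) + pvTot fs

theorem pvPfx_ge (fs : List (List Int)) : ∀ (t x : Int), x ∈ pvPfx fs t → t ≤ x := by
  induction fs with
  | nil => intro t x h; simp [pvPfx] at h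
  | cons f fs ih =>
    intro t x h
    simp only [pvPfx, List.mem_cons] at h
    rcases h with h | h
    · omega
    · have := ih _ _ h; omega

-- B's fold computes (pvPfx, base + pvTot)
theorem pvFoldB (fs : List (List Int)) : ∀ (acc : List Int) (t : Int),
    fs.foldl (fun (st : List Int × Int) family =>
        let u := st.2 + (family.length : Int)
        (st.1 ++ [u], u)) (acc, t)
      = (acc ++ pvPfx fs t, t + pvTot fs) := by
  induction fs with
  | nil => intro acc t; simp [pvPfx, pvTot]
  | cons f fs ih =>
    intro acc t
    simp only [List.foldl_cons, ih, pvPfx, pvTot]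
    rw [Prod.mk.injEq]
    exact ⟨by simp, by ring⟩

-- A's inner loop: appends the block (sid,cid)…(sid+|f|-1,cid)
theorem pvInner (f : List Int) (cid : Int) : ∀ (acc : List (Int × Int)) (sid : Int),
    f.foldl (fun (s : List (Int × Int) × Int) _ => (s.1 ++ [(s.2, cid)], s.2 + 1)) (acc, sid)
      = (acc ++ (PySem.List.pyRange sid (sid + (f.length : Int)) 1).map (fun s => (s, cid)),
         sid + (f.length : Int)) := by
  induction f with
  | nil => intro acc sid; simp [PySem.List.pyRange_one_eq_nil (by omega : sid + (0:Int) ≤ sid)]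
  | cons x xs ih =>
    intro acc sid
    simp only [List.foldl_cons, ih]
    have hb : sid + ((x :: xs).length : Int) = sid + 1 + (xs.length : Int) := by
      simp; push_cast; omega
    rw [hb]
    conv_rhs => rw [PySem.List.pyRange_one_cons
      (show sid < sid + 1 + (xs.length : Int) by omega)]
    simp

-- A's outer fold with the inner loop already expanded (clean step), by induction
theorem pvOuter' (fs : List (List Int)) : ∀ (acc : List (Int × Int)) (sid cid : Int),
    (fs.foldl
      (fun (st : List (Int × Int) × Int × Int) family =>
        (st.1 ++ (PySem.List.pyRange st.2.1 (st.2.1 + (family.length : Int)) 1).map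
            (fun s => (s, st.2.2)),
         st.2.1 + (family.length : Int), st.2.2 + 1))
      (acc, sid, cid)).1
    = acc ++ (PySem.List.pyRange sid (sid + pvTot fs) 1).map
        (fun s => (s, cid + ((pvPfx fs (sid - 1)).countP (fun p => decide (p < s)) : Int))) := by
  induction fs with
  | nil =>
    intro acc sid cid
    simp [pvTot, PySem.List.pyRange_one_eq_nil (by omega : sid + (0:Int) ≤ sid)]
  | cons f fs ih =>
    intro acc sid cid
    simp only [List.foldl_cons]
    rw [ih]
    simp only [pvTot, pvPfx]
    have htot : (0:Int) ≤ pvTot fs := by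
      clear ih; induction fs with
      | nil => simp [pvTot]
      | cons g gs ihg => simp only [pvTot]; omega
    rw [PySem.List.pyRange_one_append sid (sid + (f.length : Int))
         (sid + ((f.length : Int) + pvTot fs)) (by omega) (by omega),
       List.map_append, List.append_assoc]
    congr 1
    congr 1
    · -- first block: count is 0 there
      apply List.map_congr_left
      intro s hs
      rw [PySem.List.mem_pyRange_one] at hs
      have hcnt : (((sid - 1 + (f.length : Int)) :: pvPfx fs (sid - 1 + (f.length : Int))).countP
          (fun p => decide (p < s))) = 0 := by
        rw [List.countP_eq_zero]
        intro p hp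
        simp only [List.mem_cons] at hp
        rcases hp with hp | hp
        · simp; omega
        · have := pvPfx_ge fs _ _ hp; simp; omega
      rw [hcnt]
      norm_num
    · -- second block: first prefix entry always counts
      rw [show sid + ((f.length : Int) + pvTot fs) = (sid + (f.length : Int)) + pvTot fs by ring]
      apply List.map_congr_left
      intro s hs
      rw [PySem.List.mem_pyRange_one] at hs
      have h1 : (sid - 1 + (f.length : Int)) < s := by omega
      simp only [pvPfx, List.countP_cons, h1, decide_true]
      have h2 : sid + (f.length : Int) - 1 = sid - 1 + (f.length : Int) := by ring
      rw [h2]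
      push_cast
      ring_nf

-- A's outer fold equals the rank-query canonical form
theorem pvOuter (fs : List (List Int)) (acc : List (Int × Int)) (sid cid : Int) :
    (fs.foldl
      (fun (st : List (Int × Int) × Int × Int) family =>
        let inner := family.foldl
          (fun (s : List (Int × Int) × Int) _ => (s.1 ++ [(s.2, st.2.2)], s.2 + 1))
          (st.1, st.2.1)
        (inner.1, inner.2, st.2.2 + 1))
      (acc, sid, cid)).1
    = acc ++ (PySem.List.pyRange sid (sid + pvTot fs) 1).map
        (fun s => (s, cid + ((pvPfx fs (sid - 1)).countP (fun p => decide (p < s)) : Int))) := by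
  have hstep : (fun (st : List (Int × Int) × Int × Int) (family : List Int) =>
        let inner := family.foldl
          (fun (s : List (Int × Int) × Int) _ => (s.1 ++ [(s.2, st.2.2)], s.2 + 1))
          (st.1, st.2.1)
        ((inner.1, inner.2, st.2.2 + 1) : List (Int × Int) × Int × Int))
      = (fun st family =>
        (st.1 ++ (PySem.List.pyRange st.2.1 (st.2.1 + (family.length : Int)) 1).map
            (fun s => (s, st.2.2)),
         st.2.1 + (family.length : Int), st.2.2 + 1)) := by
    funext st family
    simp only [pvInner]
  rw [hstep, pvOuter']

-- countP of a 01-split list: all-true up to k, all-false from k on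
theorem pvCountSplit (xs : List Int) (p : Int → Bool) (k : Nat) (hk : k ≤ xs.length)
    (h1 : ∀ (i : Nat) (h : i < xs.length), i < k → p xs[i] = true)
    (h2 : ∀ (i : Nat) (h : i < xs.length), k ≤ i → p xs[i] = false) :
    xs.countP p = k := by
  rw [← List.take_append_drop k xs, List.countP_append]
  have ht : (xs.take k).countP p = (xs.take k).length := by
    rw [List.countP_eq_length]
    intro a ha
    obtain ⟨i, hi, rfl⟩ := List.mem_iff_getElem.mp ha
    have hik : i < k := lt_of_lt_of_le hi (by simp)
    have hix : i < xs.length := lt_of_lt_of_le hik hk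
    rw [List.getElem_take]
    exact h1 i hix hik
  have hd : (xs.drop k).countP p = 0 := by
    rw [List.countP_eq_zero]
    intro a ha
    obtain ⟨i, hi, rfl⟩ := List.mem_iff_getElem.mp ha
    rw [List.getElem_drop]
    simp only [List.length_drop] at hi
    simp [h2 (k + i) (by omega) (by omega)]
  rw [ht, hd, List.length_take]
  omega

-- the prefix table is nondecreasing
theorem pvPfx_sorted (fs : List (List Int)) : ∀ (t : Int), (pvPfx fs t).Pairwise (· ≤ ·) := by
  induction fs with
  | nil => intro t; simp [pvPfx]
  | cons f fs ih =>
    intro t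
    simp only [pvPfx, List.pairwise_cons]
    exact ⟨fun x hx => pvPfx_ge fs _ _ hx, ih _⟩

-- the binary search computes the rank (= countP (· < s)) on a sorted table
theorem pvBisect_eq (xs : List Int) (s : Int) (hs : xs.Pairwise (· ≤ ·)) :
    ∀ (n lo hi : Nat), hi - lo ≤ n → lo ≤ hi → hi ≤ xs.length →
    (∀ (i : Nat) (h : i < xs.length), i < lo → xs[i] < s) →
    (∀ (i : Nat) (h : i < xs.length), hi ≤ i → ¬ xs[i] < s) →
    pvBisect xs s lo hi = xs.countP (fun p => decide (p < s)) := by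
  have hmono : ∀ (i j : Nat) (hj : j < xs.length) (hij : i ≤ j),
      xs[i]'(lt_of_le_of_lt hij hj) ≤ xs[j] := by
    intro i j hj hij
    rcases Nat.lt_or_ge i j with h | h
    · exact List.pairwise_iff_getElem.mp hs i j (by omega) hj h
    · have hij' : i = j := by omega
      subst hij'; exact le_refl _
  intro n
  induction n with
  | zero =>
    intro lo hi hn hlh hhl h1 h2
    rw [pvBisect, dif_neg (by omega : ¬ lo < hi)]
    have he : lo = hi := by omega
    subst he
    exact (pvCountSplit xs _ lo (by omega)
      (fun i h hik => by simp [h1 i h hik])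
      (fun i h hik => by simp [h2 i h hik])).symm
  | succ n ih =>
    intro lo hi hn hlh hhl h1 h2
    rw [pvBisect]
    by_cases hlt : lo < hi
    · rw [dif_pos hlt]
      dsimp only
      have hmx : (lo + hi) / 2 < xs.length := by omega
      have hget : PySem.List.pyGetD xs (((lo + hi) / 2 : Nat) : Int) 0 = xs[(lo + hi) / 2] := by
        rw [PySem.List.pyGetD_natCast, List.getD_eq_getElem _ _ hmx]
      rw [hget]
      by_cases hc : xs[(lo + hi) / 2] < s
      · rw [if_pos hc]
        refine ih ((lo + hi) / 2 + 1) hi (by omega) (by omega) hhl ?_ h2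
        intro i h hik
        have hle : xs[i] ≤ xs[(lo + hi) / 2] := hmono i _ hmx (by omega)
        omega
      · rw [if_neg hc]
        refine ih lo ((lo + hi) / 2) (by omega) (by omega) (by omega) h1 ?_
        intro i h hik
        have hle : xs[(lo + hi) / 2] ≤ xs[i] := hmono _ i h hik
        omega
    · rw [dif_neg hlt]
      have he : lo = hi := by omega
      subst he
      exact (pvCountSplit xs _ lo (by omega)
        (fun i h hik => by simp [h1 i h hik])
        (fun i h hik => by simp [h2 i h hik])).symm

-- ===== VERDICT (by name: the statement is the Claim_ definition above) =====
theorem create_student_relations_spec : Claim_equal_create_student_relations := by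
  intro families _
  show create_student_relations families = create_student_relations_alt families
  unfold create_student_relations create_student_relations_alt
  rw [pvOuter, pvFoldB]
  have h : (1:Int) + pvTot families = pvTot families + 1 := by ring
  simp only [List.nil_append, h]
  norm_num
  intro s hs1 hs2
  rw [pvBisect_eq (pvPfx families 0) s (pvPfx_sorted families 0)
      ((pvPfx families 0).length) 0 ((pvPfx families 0).length)
      (by omega) (by omega) (le_refl _)
      (fun i h hik => absurd hik (by omega))
      (fun i h hik => absurd h (by omega))]
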